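-- pv_equiv track=rewrite | github.com/maheepindersinghmajithia/Python-Mini-Projects | Bernoulli's_triangle.py | bernoulli_triangle
-- ===== SOURCE A (Python) =====
-- def next_row(l):
--     '''
--     returns the next row of the bernoulli's triangle when a previous row of the
--     triangle gets consumed. It gives the first row of the bernoulli's triangle
--     when an empty row is fed. rows are in the form of a list.
--
--     next_row: (Listof Nat) -> (listof Nat)
--     EXamples:
--     next_rows([1,3,4]) -> [1,4,7,8]
--     next_rows([]) -> [1]
--     '''
--     i = []
--     while len(i) < len(l) + 1:
--         if i == []:
--             i = i + [1]
--         elif len(i) == len(l):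
--             i = i + [2*l[-1]]
--         else:
--             i = i + [l[len(i)] + l[len(i) - 1]]
--     return i
--
-- def bernoulli_triangle(n):
--     '''
--     that consumes a positive integernand returns a list of length n, where the
--     first element is a list representing the first row of Bernoulli's Triangle,
--     the second element is a list representing the second row of Bernoulli's
--     Triangle, etc.
--
--     bernoulli_triangle: Nat -> (Listof(listof Nat))
--
--     Example:
--     bernoulli_triangle (1) => [[1]]
--     bernoulli_triangle (4)=> [[1], [1, 2], [1, 3, 4], [1, 4, 7, 8]]
--     '''
--     lol = []
--     while n > 0 :
--         if lol == []:
--             lol = lol + [next_row([])]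
--             n=n-1
--         else :
--             lol = lol + [next_row(lol[-1])]
--             n=n-1
--     return lol
-- ===== SOURCE B (Python) =====
-- def bernoulli_triangle(n):
--     rows = []
--     for i in range(n):
--         c = 1  # C(i, 0), updated multiplicatively: C(i, k+1) = C(i, k)*(i-k)//(k+1)
--         acc = 0
--         row = []
--         for k in range(i + 1):
--             acc += c
--             row.append(acc)
--             c = c * (i - k) // (k + 1)
--         rows.append(row)
--     return rows
-- ===== Notes on version B (the rewrite author's own statement) =====
-- stated objective: alternative
-- what changed: B computes each row independently as the running partial sums of binomial coefficients (C(i,k) maintained multiplicatively), instead of A's element-by-element while-loop deriving every row from the previous row via adjacent sums and a doubled final entry.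
import Mathlib
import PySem

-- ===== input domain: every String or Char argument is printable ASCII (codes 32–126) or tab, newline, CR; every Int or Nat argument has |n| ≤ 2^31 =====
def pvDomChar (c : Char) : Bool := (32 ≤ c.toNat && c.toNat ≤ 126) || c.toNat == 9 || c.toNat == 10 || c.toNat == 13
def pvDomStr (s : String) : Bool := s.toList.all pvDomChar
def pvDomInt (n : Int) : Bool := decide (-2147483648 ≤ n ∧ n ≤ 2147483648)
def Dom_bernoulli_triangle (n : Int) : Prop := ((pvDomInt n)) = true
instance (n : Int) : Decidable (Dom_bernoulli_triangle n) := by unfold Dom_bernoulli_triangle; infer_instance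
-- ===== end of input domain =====

-- B replaces A's row-from-previous-row recurrence by a per-row closed form (running
-- partial sums of binomial coefficients computed multiplicatively); objective: alternative.

-- ===== PORT A =====
-- while len(i) < len(l) + 1: append one element per iteration (l[-1], l[len(i)], l[len(i)-1]
-- are always in range on reachable states; pyGetD's default 0 is never read).
def next_row_loop (l : List Int) (i : List Int) : List Int :=
  if i.length < l.length + 1 then
    next_row_loop l
      (if i = [] then i ++ [1]
       else if i.length = l.length then i ++ [2 * PySem.List.pyGetD l (-1) 0]
       else i ++ [PySem.List.pyGetD l (i.length : Int) 0 + PySem.List.pyGetD l ((i.length : Int) - 1) 0])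
  else i
termination_by l.length + 1 - i.length
decreasing_by
  all_goals (split_ifs <;> simp_all <;> omega)

def next_row (l : List Int) : List Int := next_row_loop l []

def bt_loop (n : Int) (lol : List (List Int)) : List (List Int) :=
  if n > 0 then
    if lol = [] then bt_loop (n - 1) (lol ++ [next_row []])
    else bt_loop (n - 1) (lol ++ [next_row (PySem.List.pyGetD lol (-1) [])])
  else lol
termination_by n.toNat
decreasing_by all_goals omega

def bernoulli_triangle (n : Int) : List (List Int) := bt_loop n []

-- ===== PORT B =====
-- for i in range(n): build row i as running partial sums acc of C(i,k), with
-- c = C(i,k) maintained by c = c*(i-k)//(k+1); rows collected by appending.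
def bernoulli_triangle_alt (n : Int) : List (List Int) :=
  (PySem.List.pyRange 0 n 1).foldl
    (fun rows i =>
      let st := (PySem.List.pyRange 0 (i + 1) 1).foldl
        (fun (st : Int × Int × List Int) k =>
          let acc := st.2.1 + st.1
          let row := st.2.2 ++ [acc]
          let c := PySem.Int.floordiv (st.1 * (i - k)) (k + 1)
          (c, acc, row))
        ((1 : Int), (0 : Int), ([] : List Int))
      rows ++ [st.2.2])
    []

-- ===== PRECONDITION & SPEC =====
def Spec_bernoulli_triangle (n : Int) (out : List (List Int)) : Prop := out = bernoulli_triangle_alt n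
instance (n : Int) (out : List (List Int)) : Decidable (Spec_bernoulli_triangle n out) := by unfold Spec_bernoulli_triangle; infer_instance

-- ===== CLAIM (what is proved, stated in full; the proofs are below) =====
def Claim_equal_bernoulli_triangle : Prop := ∀ (n : Int), Dom_bernoulli_triangle n → Spec_bernoulli_triangle n (bernoulli_triangle n)

-- ===== LEMMAS AND PROOFS =====

-- S i k = ∑_{j=0}^{k} C(i,j): the k-th entry of row i of Bernoulli's triangle.
def S (i k : Nat) : Int := ∑ j ∈ Finset.range (k + 1), (Nat.choose i j : Int)

def refRow (i : Nat) : List Int := (List.range (i + 1)).map (S i)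

lemma S_zero (i : Nat) : S i 0 = 1 := by simp [S]

lemma S_succ (i k : Nat) : S i (k + 1) = S i k + (Nat.choose i (k + 1) : Int) := by
  simp [S, Finset.sum_range_succ]

lemma S_succ_succ (i k : Nat) : S (i + 1) (k + 1) = S i (k + 1) + S i k := by
  induction k with
  | zero =>
      rw [S_succ, S_zero, S_succ, S_zero, Nat.choose_one_right, Nat.choose_one_right]
      push_cast; ring
  | succ k ih =>
      rw [S_succ (i+1) (k+1), ih, S_succ i (k+1),
        show (i+1).choose (k+1+1) = i.choose (k+1) + i.choose (k+1+1) from Nat.choose_succ_succ _ _]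
      have h2 := S_succ i k
      push_cast at h2 ⊢; linarith

lemma S_diag_succ (i : Nat) : S (i + 1) (i + 1) = 2 * S i i := by
  rw [S_succ_succ, S_succ, Nat.choose_succ_self]; push_cast; ring

lemma length_refRow (i : Nat) : (refRow i).length = i + 1 := by simp [refRow]

lemma refRow_getElem (i k : Nat) (h : k < i + 1) : (refRow i)[k]'(by simp [length_refRow, h]) = S i k := by
  simp [refRow]

lemma refRow_ne_nil (i : Nat) : refRow i ≠ [] := by
  intro h; have := length_refRow i; rw [h] at this; simp at this

lemma refRow_getLast (i : Nat) : (refRow i).getLast (refRow_ne_nil i) = S i i := by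
  rw [List.getLast_eq_getElem]
  simp [length_refRow, refRow_getElem]

lemma refRow_pyGetD (i k : Nat) (h : k < i + 1) :
    PySem.List.pyGetD (refRow i) (k : Int) 0 = S i k := by
  rw [PySem.List.pyGetD_of_nonneg _ _ (by positivity)]
  simp only [List.getD, Int.toNat_natCast]
  rw [List.getElem?_eq_getElem (by simp [length_refRow]; omega)]
  simp [refRow_getElem i k h]

lemma refRow_take_succ (i j : Nat) (h : j < i + 1) :
    (refRow i).take (j + 1) = (refRow i).take j ++ [S i j] := by
  rw [List.take_add_one, List.getElem?_eq_getElem (by simp [length_refRow]; omega),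
    refRow_getElem i j h]
  simp

-- the A-side row loop, fed prefixes of refRow (i+1), produces refRow (i+1)
lemma next_row_loop_inv (i m : Nat) (hm : m ≤ i + 2) :
    next_row_loop (refRow i) ((refRow (i + 1)).take m) = refRow (i + 1) := by
  induction hd : i + 2 - m generalizing m with
  | zero =>
      have hm2 : m = i + 2 := by omega
      rw [next_row_loop]
      simp [hm2, length_refRow, List.take_of_length_le]
  | succ d ih =>
      have hmlt : m < i + 2 := by omega
      have hlen : ((refRow (i + 1)).take m).length = m := by
        simp [length_refRow]; omega
      rw [next_row_loop, if_pos (by rw [hlen, length_refRow]; omega)]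
      by_cases h0 : m = 0
      · subst h0
        rw [if_pos (by simp)]
        have h1 : ([] : List Int) ++ [1] = (refRow (i + 1)).take 1 := by
          rw [show (1:Nat) = 0 + 1 from rfl, refRow_take_succ (i+1) 0 (by omega)]
          simp [S_zero]
        simp only [List.take_zero] at *
        rw [h1]
        exact ih 1 (by omega) (by omega)
      · rw [if_neg (by intro hnil; rw [hnil] at hlen; simp at hlen; omega)]
        by_cases hdiag : m = i + 1
        · rw [if_pos (by rw [hlen, length_refRow, hdiag])]
          rw [PySem.List.pyGetD_neg_one _ _ (refRow_ne_nil i), refRow_getLast,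
            show 2 * S i i = S (i+1) m by rw [hdiag]; exact (S_diag_succ i).symm,
            ← refRow_take_succ (i+1) m (by omega)]
          exact ih (m + 1) (by omega) (by omega)
        · have hm1 : 1 ≤ m := by omega
          have hmi : m ≤ i := by omega
          rw [if_neg (by rw [hlen, length_refRow]; omega)]
          rw [hlen]
          have e1 : PySem.List.pyGetD (refRow i) (m : Int) 0 = S i m :=
            refRow_pyGetD i m (by omega)
          have e2 : PySem.List.pyGetD (refRow i) ((m : Int) - 1) 0 = S i (m - 1) := by
            rw [show ((m : Int) - 1) = ((m - 1 : Nat) : Int) by omega]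
            exact refRow_pyGetD i (m - 1) (by omega)
          rw [e1, e2,
            show S i m + S i (m - 1) = S (i + 1) m by
              have := S_succ_succ i (m - 1)
              rw [show m - 1 + 1 = m from by omega] at this
              linarith,
            ← refRow_take_succ (i+1) m (by omega)]
          exact ih (m + 1) (by omega) (by omega)

lemma next_row_refRow (i : Nat) : next_row (refRow i) = refRow (i + 1) := by
  have := next_row_loop_inv i 0 (by omega); simpa [next_row] using this

lemma next_row_nil : next_row [] = refRow 0 := by
  rw [next_row, next_row_loop]
  norm_num
  rw [next_row_loop]
  norm_num [refRow, S]

lemma map_refRow_snoc (t : Nat) :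
    (List.range t).map refRow ++ [refRow t] = (List.range (t + 1)).map refRow := by
  rw [List.range_succ, List.map_append]; rfl

lemma bt_loop_inv (n : Int) (t : Nat) :
    bt_loop n ((List.range t).map refRow) = (List.range (t + n.toNat)).map refRow := by
  induction hd : n.toNat generalizing n t with
  | zero =>
      rw [bt_loop, if_neg (by omega)]
      simp
  | succ d ih =>
      have hn : n > 0 := by omega
      rw [bt_loop, if_pos hn]
      by_cases ht : t = 0
      · subst ht
        rw [if_pos (by simp)]
        simp only [List.range_zero, List.map_nil, List.nil_append]
        rw [next_row_nil, show [refRow 0] = (List.range 1).map refRow from rfl,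
          ih (n - 1) 1 (by omega)]
        congr 1; congr 1; omega
      · rw [if_neg (by simp [List.range_eq_nil]; omega)]
        have hnil : (List.range t).map refRow ≠ [] := by
          simp [List.range_eq_nil]; omega
        have hlast : ((List.range t).map refRow).getLast hnil = refRow (t - 1) := by
          rw [List.getLast_eq_getElem]
          simp only [List.length_map, List.length_range, List.getElem_map,
            List.getElem_range]
        rw [PySem.List.pyGetD_neg_one _ _ hnil, hlast, next_row_refRow,
          show t - 1 + 1 = t from by omega, map_refRow_snoc, ih (n - 1) (t + 1) (by omega)]
        congr 1; congr 1; omega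

lemma bernoulli_eq_ref (n : Int) : bernoulli_triangle n = (List.range n.toNat).map refRow := by
  have := bt_loop_inv n 0; simpa [bernoulli_triangle] using this

-- the B-side inner fold maintains (C(i,m), S i m − C(i,m), refRow i take m)
lemma alt_row_inv (i m : Nat) (hm : m ≤ i + 1) :
    (PySem.List.pyRange (m : Int) ((i : Int) + 1) 1).foldl
        (fun (st : Int × Int × List Int) k =>
          let acc := st.2.1 + st.1
          let row := st.2.2 ++ [acc]
          let c := PySem.Int.floordiv (st.1 * ((i : Int) - k)) (k + 1)
          (c, acc, row))
        ((Nat.choose i m : Int), S i m - (Nat.choose i m : Int), (refRow i).take m)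
      = ((Nat.choose i (i + 1) : Int), S i (i + 1) - (Nat.choose i (i + 1) : Int), refRow i) := by
  induction hd : i + 1 - m generalizing m with
  | zero =>
      have hm1 : m = i + 1 := by omega
      subst hm1
      rw [PySem.List.pyRange_one_eq_nil (by omega), List.foldl_nil,
        List.take_of_length_le (le_of_eq (length_refRow i))]
  | succ d ih =>
      have hmi : m ≤ i := by omega
      rw [PySem.List.pyRange_one_cons (by omega), List.foldl_cons]
      simp only []
      have hacc : S i m - (Nat.choose i m : Int) + (Nat.choose i m : Int) = S i m := by ring
      have hc : PySem.Int.floordiv ((Nat.choose i m : Int) * ((i : Int) - (m : Int))) ((m : Int) + 1)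
          = (Nat.choose i (m + 1) : Int) := by
        rw [show ((i : Int) - (m : Int)) = ((i - m : Nat) : Int) by omega,
          show ((m : Int) + 1) = ((m + 1 : Nat) : Int) by push_cast; ring,
          show ((Nat.choose i m : Int) * ((i - m : Nat) : Int)) = ((Nat.choose i m * (i - m) : Nat) : Int) by push_cast; ring,
          PySem.Int.floordiv_natCast, ← Nat.choose_succ_right_eq,
          Nat.mul_div_cancel _ (by omega)]
      rw [hacc, hc, ← refRow_take_succ i m (by omega),
        show ((m : Int) + 1) = ((m + 1 : Nat) : Int) by push_cast; ring,
        show S i m = S i (m + 1) - (Nat.choose i (m + 1) : Int) by rw [S_succ]; ring]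
      exact ih (m + 1) (by omega) (by omega)

lemma alt_row (i : Nat) :
    ((PySem.List.pyRange 0 ((i : Int) + 1) 1).foldl
        (fun (st : Int × Int × List Int) k =>
          let acc := st.2.1 + st.1
          let row := st.2.2 ++ [acc]
          let c := PySem.Int.floordiv (st.1 * ((i : Int) - k)) (k + 1)
          (c, acc, row))
        ((1 : Int), (0 : Int), ([] : List Int))).2.2 = refRow i := by
  have h := alt_row_inv i 0 (by omega)
  simp only [Nat.choose_zero_right, Nat.cast_one, S_zero, Nat.cast_zero,
    List.take_zero, sub_self] at h
  simpa using congrArg (fun p => p.2.2) h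

lemma alt_eq_ref (n : Int) : bernoulli_triangle_alt n = (List.range n.toNat).map refRow := by
  rw [bernoulli_triangle_alt]
  rw [show (fun (rows : List (List Int)) (i : Int) =>
      rows ++ [((PySem.List.pyRange 0 (i + 1) 1).foldl
        (fun (st : Int × Int × List Int) k =>
          let acc := st.2.1 + st.1
          let row := st.2.2 ++ [acc]
          let c := PySem.Int.floordiv (st.1 * (i - k)) (k + 1)
          (c, acc, row))
        ((1 : Int), (0 : Int), ([] : List Int))).2.2]) = (fun rows i => rows ++ [(fun (i : Int) =>
      ((PySem.List.pyRange 0 (i + 1) 1).foldl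
        (fun (st : Int × Int × List Int) k =>
          let acc := st.2.1 + st.1
          let row := st.2.2 ++ [acc]
          let c := PySem.Int.floordiv (st.1 * (i - k)) (k + 1)
          (c, acc, row))
        ((1 : Int), (0 : Int), ([] : List Int))).2.2) i]) from rfl,
    PySem.List.foldl_append_singleton_eq_map, PySem.List.pyRange_one, List.map_map,
    List.nil_append]
  simp only [Int.sub_zero]
  apply List.map_congr_left
  intro k hk
  simp only [Function.comp_apply, zero_add]
  exact alt_row k

-- ===== VERDICT (by name: the statement is the Claim_ definition above) =====
theorem bernoulli_triangle_spec : Claim_equal_bernoulli_triangle := by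
  intro n _
  unfold Spec_bernoulli_triangle
  rw [bernoulli_eq_ref, alt_eq_ref]
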